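-- pv_equiv track=rewrite | github.com/AmbidextrousCoatie/league_analyzer | league_analyzer_v1/pipeline/sanitize.py | sanitize_rows
-- ===== SOURCE A (Python) =====
-- from typing import Dict, List, Tuple
--
-- def _game_id_and_team_for_dedup(row: Dict[str, str]) -> Tuple[str, str]:
--     """
--     Canonical CSV uses ``Game-ID`` / ``Teamname``; GF staging rows use numeric field ids
--     (``57`` = Game-ID, ``1`` = Spiel-ID label, ``3`` = team).
--     """
--     game_id = (row.get("Game-ID") or row.get("Spiel-ID") or "").strip()
--     team = (row.get("Teamname") or "").strip()
--     if not game_id: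
--         game_id = (row.get("57") or row.get("1") or "").strip()
--     if not team:
--         team = (row.get("3") or "").strip()
--     return game_id, team
--
-- def _trim(row: Dict[str, str]) -> Dict[str, str]:
--     out: Dict[str, str] = {}
--     for k, v in row.items():
--         out[k] = v.strip() if isinstance(v, str) else v
--     return out
--
-- def sanitize_rows(rows: List[Dict[str, str]]) -> List[Dict[str, str]]:
--     """
--     Sprint-1 minimal sanitization:
--     - trim whitespace
--     - deterministic dedup by (Game-ID/Spiel-ID, Teamname, source_entry_id), keep earliest source_date_updated
--     """
--     dedup: Dict[Tuple[str, str, str], Dict[str, str]] = {}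
--     for raw in rows:
--         row = _trim(raw)
--         game_id, team = _game_id_and_team_for_dedup(row)
--         entry_id = row.get("source_entry_id") or ""
--         key = (game_id, team, entry_id)
--         existing = dedup.get(key)
--         if existing is None:
--             dedup[key] = row
--             continue
--         ex_ts = existing.get("source_date_updated", "")
--         cur_ts = row.get("source_date_updated", "")
--         if cur_ts and (not ex_ts or cur_ts < ex_ts):
--             dedup[key] = row
--     return sorted(dedup.values(), key=lambda r: (r.get("source_date_updated", ""), r.get("source_entry_id", "")))
-- ===== SOURCE B (Python) =====
-- from typing import Dict, List, Tuple
--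
-- def _first_truthy(*vals):
--     for v in vals:
--         if v:
--             return v
--     return ""
--
-- def _dedup_key(row: Dict[str, str]) -> Tuple[str, str, str]:
--     return (
--         _first_truthy(row.get("Game-ID"), row.get("Spiel-ID"), row.get("57"), row.get("1")),
--         _first_truthy(row.get("Teamname"), row.get("3")),
--         row.get("source_entry_id") or "",
--     )
--
-- def _earlier(best: Dict[str, str], cand: Dict[str, str]) -> Dict[str, str]:
--     b = best.get("source_date_updated", "")
--     c = cand.get("source_date_updated", "")
--     return cand if c and (not b or c < b) else best
--
-- def _pick(group: List[Dict[str, str]]) -> Dict[str, str]: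
--     best = group[0]
--     for cand in group[1:]:
--         best = _earlier(best, cand)
--     return best
--
-- def sanitize_rows(rows: List[Dict[str, str]]) -> List[Dict[str, str]]:
--     trimmed = [{k: (v.strip() if isinstance(v, str) else v) for k, v in row.items()} for row in rows]
--     groups: Dict[Tuple[str, str, str], List[Dict[str, str]]] = {}
--     for row in trimmed:
--         groups.setdefault(_dedup_key(row), []).append(row)
--     selected = [_pick(group) for group in groups.values()]
--     return sorted(selected, key=lambda r: (r.get("source_date_updated", ""), r.get("source_entry_id", "")))
-- ===== Notes on version B (the rewrite author's own statement) =====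
-- stated objective: alternative
-- what changed: A dedups in one pass by updating a key-to-best-row dict in place; B trims all rows first, groups them by key into lists, then reduces each group to its earliest-timestamp representative before sorting.
import Mathlib
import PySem

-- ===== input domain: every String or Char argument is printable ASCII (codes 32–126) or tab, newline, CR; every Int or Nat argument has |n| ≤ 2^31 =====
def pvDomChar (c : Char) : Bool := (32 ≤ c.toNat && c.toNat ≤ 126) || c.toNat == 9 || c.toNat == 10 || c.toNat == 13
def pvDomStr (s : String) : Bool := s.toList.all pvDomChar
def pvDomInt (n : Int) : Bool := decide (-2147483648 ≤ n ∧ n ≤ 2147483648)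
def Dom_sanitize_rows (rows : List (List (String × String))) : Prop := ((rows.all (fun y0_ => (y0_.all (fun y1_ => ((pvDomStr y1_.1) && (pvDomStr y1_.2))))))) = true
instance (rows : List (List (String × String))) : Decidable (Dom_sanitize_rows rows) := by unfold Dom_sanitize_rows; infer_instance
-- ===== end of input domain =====

-- B re-decomposes A's single dedup-dict update loop into trim-all / group-by-key / reduce-each-group / sort (same cost; objective: alternative decomposition).

-- ===== PORT A =====
-- row.get(k, default-"" after `or ""`): None and "" both collapse to ""
def pvGetS (d : PySem.Dict String String) (k : String) : String := d.getD k ""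

-- Python `a or b` on strings already defaulted to ""
def pvOrS (a b : String) : String := if a = "" then b else a

-- _trim: rebuild the dict with stripped values (every value is a str here)
def pvTrim (raw : List (String × String)) : PySem.Dict String String :=
  (PySem.Dict.ofList raw).items.foldl
    (fun out kv => out.insert kv.1 (PySem.Str.strip kv.2)) PySem.Dict.empty

-- _game_id_and_team_for_dedup
def pvGameTeam (row : PySem.Dict String String) : String × String :=
  let game_id := PySem.Str.strip (pvOrS (pvGetS row "Game-ID") (pvGetS row "Spiel-ID"))
  let team := PySem.Str.strip (pvGetS row "Teamname")
  let game_id := if game_id = "" then PySem.Str.strip (pvOrS (pvGetS row "57") (pvGetS row "1")) else game_id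
  let team := if team = "" then PySem.Str.strip (pvGetS row "3") else team
  (game_id, team)

-- one iteration of A's dedup loop
def pvStepA (dedup : PySem.Dict (String × String × String) (PySem.Dict String String))
    (raw : List (String × String)) : PySem.Dict (String × String × String) (PySem.Dict String String) :=
  let row := pvTrim raw
  let gt := pvGameTeam row
  let entry_id := pvGetS row "source_entry_id"
  let key := (gt.1, gt.2, entry_id)
  match dedup.get? key with
  | none => dedup.insert key row
  | some existing =>
    let ex_ts := pvGetS existing "source_date_updated"
    let cur_ts := pvGetS row "source_date_updated"
    if cur_ts ≠ "" ∧ (ex_ts = "" ∨ cur_ts < ex_ts) then dedup.insert key row else dedup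

def sanitize_rows (rows : List (List (String × String))) : List (List (String × String)) :=
  let dedup := rows.foldl pvStepA PySem.Dict.empty
  (PySem.List.sorted2 dedup.values
      (fun r => pvGetS r "source_date_updated") (fun r => pvGetS r "source_entry_id")).map PySem.Dict.items

-- ===== PORT B =====
-- _first_truthy(*vals): first non-None, non-empty value, else ""
def pvFirstTruthy : List (Option String) → String
  | [] => ""
  | v :: rest =>
    match v with
    | some s => if s = "" then pvFirstTruthy rest else s
    | none => pvFirstTruthy rest

-- _dedup_key
def pvKey (row : PySem.Dict String String) : String × String × String :=
  (pvFirstTruthy [row.get? "Game-ID", row.get? "Spiel-ID", row.get? "57", row.get? "1"],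
   pvFirstTruthy [row.get? "Teamname", row.get? "3"],
   row.getD "source_entry_id" "")

-- _earlier
def pvEarlier (best cand : PySem.Dict String String) : PySem.Dict String String :=
  let b := best.getD "source_date_updated" ""
  let c := cand.getD "source_date_updated" ""
  if c ≠ "" ∧ (b = "" ∨ c < b) then cand else best

-- _pick (groups are nonempty; [] is unreachable, totalized with the empty dict)
def pvPick : List (PySem.Dict String String) → PySem.Dict String String
  | [] => PySem.Dict.empty
  | h :: t => t.foldl pvEarlier h

-- dict comprehension {k: v.strip() for k, v in row.items()} (keys are already distinct)
def pvTrimB (raw : List (String × String)) : PySem.Dict String String :=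
  ⟨(PySem.Dict.ofList raw).items.map (fun kv => (kv.1, PySem.Str.strip kv.2))⟩

-- groups.setdefault(key, []).append(row)
def pvStepG (g : PySem.Dict (String × String × String) (List (PySem.Dict String String)))
    (row : PySem.Dict String String) : PySem.Dict (String × String × String) (List (PySem.Dict String String)) :=
  g.modify (pvKey row) [] (fun l => l ++ [row])

def sanitize_rows_alt (rows : List (List (String × String))) : List (List (String × String)) :=
  let trimmed := rows.map pvTrimB
  let groups := trimmed.foldl pvStepG PySem.Dict.empty
  let selected := groups.values.map pvPick
  (PySem.List.sorted2 selected
      (fun r => r.getD "source_date_updated" "") (fun r => r.getD "source_entry_id" "")).map PySem.Dict.items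

-- ===== PRECONDITION & SPEC =====
def Spec_sanitize_rows (rows : List (List (String × String))) (out : List (List (String × String))) : Prop := out = sanitize_rows_alt rows
instance (rows : List (List (String × String))) (out : List (List (String × String))) : Decidable (Spec_sanitize_rows rows out) := by unfold Spec_sanitize_rows; infer_instance

-- ===== CLAIM (what is proved, stated in full; the proofs are below) =====
def Claim_equal_sanitize_rows : Prop := ∀ (rows : List (List (String × String))), Dom_sanitize_rows rows → Spec_sanitize_rows rows (sanitize_rows rows)

-- ===== LEMMAS AND PROOFS =====

-- strip is idempotent
theorem pv_dropWhile_prefix {p : Char → Bool} {l1 l2 : List Char}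
    (h : l1 <+: l2) (h2 : List.dropWhile p l2 = l2) : List.dropWhile p l1 = l1 := by
  rw [List.dropWhile_eq_self_iff] at *
  intro hl
  have := h.getElem (i := 0) hl
  rw [this]
  exact h2 (lt_of_lt_of_le hl h.length_le)

theorem pv_rstrip_prefix (l : List Char) : PySem.Chars.rstrip l <+: l := by
  have := List.dropWhile_suffix (l := l.reverse) PySem.Chars.isspace
  simpa [PySem.Chars.rstrip] using this.reverse

theorem pv_chars_strip_fix (l : List Char) :
    PySem.Chars.strip (PySem.Chars.strip l) = PySem.Chars.strip l := by
  show PySem.Chars.rstrip (PySem.Chars.lstrip (PySem.Chars.rstrip (PySem.Chars.lstrip l)))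
      = PySem.Chars.rstrip (PySem.Chars.lstrip l)
  have h1 : PySem.Chars.lstrip (PySem.Chars.rstrip (PySem.Chars.lstrip l))
      = PySem.Chars.rstrip (PySem.Chars.lstrip l) :=
    pv_dropWhile_prefix (pv_rstrip_prefix _) (List.dropWhile_idempotent _ _)
  rw [h1]
  simp [PySem.Chars.rstrip, List.reverse_reverse, List.dropWhile_idempotent]

theorem pv_strip_fix (s : String) : PySem.Str.strip (PySem.Str.strip s) = PySem.Str.strip s := by
  have h := pv_chars_strip_fix s.toList
  apply String.ext
  -- String data equality via toList
  have : (PySem.Str.strip (PySem.Str.strip s)).toList = (PySem.Str.strip s).toList := by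
    simp [PySem.Str.toList_strip, h]
  simpa [String.toList] using this

-- the two trims agree
theorem pv_trim_eq (raw : List (String × String)) : pvTrim raw = pvTrimB raw := by
  apply PySem.Dict.ext
  have hnd : ((PySem.Dict.ofList raw).items.map Prod.fst).Nodup :=
    PySem.Dict.nodup_keys_ofList raw
  have := PySem.Dict.items_foldl_insert_fresh
    (l := (PySem.Dict.ofList raw).items) (d := PySem.Dict.empty)
    (k := Prod.fst) (v := fun kv => PySem.Str.strip kv.2)
    (by intro a _; exact PySem.Dict.contains_empty _) hnd
  simpa [pvTrim, pvTrimB, PySem.Dict.items] using this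

-- every value of a trimmed row is strip-fixed
def pvStripFixed (row : PySem.Dict String String) : Prop :=
  ∀ k s, row.get? k = some s → PySem.Str.strip s = s

theorem pv_trim_stripFixed (raw : List (String × String)) : pvStripFixed (pvTrim raw) := by
  intro k s hget
  rw [pv_trim_eq] at hget
  have hmem := PySem.Dict.mem_items_of_get?_eq_some _ hget
  simp only [pvTrimB, List.mem_map] at hmem
  obtain ⟨kv, _, hkv⟩ := hmem
  have : s = PySem.Str.strip kv.2 := by
    have := congrArg Prod.snd hkv; simpa using this.symm
  rw [this, pv_strip_fix]

-- getD "" of a strip-fixed row is strip-fixed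
theorem pv_getS_fix {row : PySem.Dict String String} (h : pvStripFixed row) (k : String) :
    PySem.Str.strip (pvGetS row k) = pvGetS row k := by
  unfold pvGetS
  rw [PySem.Dict.getD_eq_get?_getD]
  cases hg : row.get? k with
  | none => rfl
  | some s => exact h k s hg

-- on strip-fixed rows, A's key computation is B's
theorem pv_key_eq {row : PySem.Dict String String} (h : pvStripFixed row) :
    ((pvGameTeam row).1, (pvGameTeam row).2, pvGetS row "source_entry_id") = pvKey row := by
  have hget : ∀ k, pvGetS row k = (row.get? k).getD "" := by
    intro k; rw [pvGetS, PySem.Dict.getD_eq_get?_getD]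
  have hfix := pv_getS_fix h
  have hor : ∀ a b, PySem.Str.strip (pvGetS row a) = pvGetS row a →
      PySem.Str.strip (pvGetS row b) = pvGetS row b →
      PySem.Str.strip (pvOrS (pvGetS row a) (pvGetS row b)) = pvOrS (pvGetS row a) (pvGetS row b) := by
    intro a b ha hb
    unfold pvOrS
    split <;> assumption
  have hft : ∀ k rest, pvFirstTruthy (row.get? k :: rest)
      = if pvGetS row k = "" then pvFirstTruthy rest else pvGetS row k := by
    intro k rest
    rw [hget]
    cases hg : row.get? k with
    | none => simp [pvFirstTruthy]
    | some s => simp only [pvFirstTruthy, Option.getD_some]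
  unfold pvGameTeam pvKey
  refine Prod.ext ?_ (Prod.ext ?_ ?_) <;> simp only
  · -- game id component
    rw [hor _ _ (hfix _) (hfix _), hor _ _ (hfix _) (hfix _)]
    rw [hft, hft, hft, hft]
    unfold pvOrS pvFirstTruthy
    by_cases h1 : pvGetS row "Game-ID" = "" <;>
      by_cases h2 : pvGetS row "Spiel-ID" = "" <;>
        by_cases h3 : pvGetS row "57" = "" <;>
          by_cases h4 : pvGetS row "1" = "" <;>
            simp [h1, h2, h3, h4]
  · -- team component
    rw [hfix "Teamname", hft, hft]
    have h3 := hfix "3"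
    have hnil : PySem.Str.strip "" = "" := rfl
    by_cases h1 : pvGetS row "Teamname" = "" <;>
      by_cases h2 : pvGetS row "3" = "" <;>
        simp_all [pvFirstTruthy]
  · rw [hget]; rfl

-- pvPick over an extended nonempty group is one pvEarlier step
theorem pv_pick_concat (gr : List (PySem.Dict String String)) (hne : gr ≠ [])
    (row : PySem.Dict String String) :
    pvPick (gr ++ [row]) = pvEarlier (pvPick gr) row := by
  cases gr with
  | nil => exact absurd rfl hne
  | cons h t => simp [pvPick, List.foldl_append]

-- the dedup dict tracks pick-of-group of the groups dict
theorem pv_fold_invariant (l : List (List (String × String)))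
    (d : PySem.Dict (String × String × String) (PySem.Dict String String))
    (g : PySem.Dict (String × String × String) (List (PySem.Dict String String)))
    (hnd : (g.items.map Prod.fst).Nodup)
    (hne : ∀ p ∈ g.items, p.2 ≠ [])
    (hrel : d.items = g.items.map (fun p => (p.1, pvPick p.2))) :
    (l.foldl pvStepA d).items
      = ((l.map pvTrim).foldl pvStepG g).items.map (fun p => (p.1, pvPick p.2)) := by
  induction l generalizing d g with
  | nil => simpa using hrel
  | cons raw rest ih =>
    simp only [List.map_cons, List.foldl_cons]
    set row := pvTrim raw with hrow
    have hkey : ((pvGameTeam row).1, (pvGameTeam row).2, pvGetS row "source_entry_id") = pvKey row :=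
      pv_key_eq (pv_trim_stripFixed raw)
    set k := pvKey row with hk
    have hdkeys : d.items.map Prod.fst = g.items.map Prod.fst := by
      rw [hrel]; simp
    have hdnd : (d.items.map Prod.fst).Nodup := by rw [hdkeys]; exact hnd
    cases hg : g.get? k with
    | none =>
      -- fresh key: both sides append
      have hgc : g.contains k = false := by
        rw [PySem.Dict.contains_eq_isSome_get?, hg]; rfl
      have hdn : d.get? k = none := by
        rw [PySem.Dict.get?_eq_none_iff_not_mem_keys]
        rw [PySem.Dict.get?_eq_none_iff_not_mem_keys] at hg
        simpa [PySem.Dict.keys, hdkeys] using hg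
      have hdc : d.contains k = false := by
        rw [PySem.Dict.contains_eq_isSome_get?, hdn]; rfl
      have hstepA : pvStepA d raw = d.insert k row := by
        unfold pvStepA
        simp only [← hrow, hkey, hdn]
      have hstepG : pvStepG g row = g.insert k [row] := by
        unfold pvStepG
        show g.insert (pvKey row) (g.getD (pvKey row) [] ++ [row]) = _
        rw [← hk, PySem.Dict.getD_of_not_contains _ _ hgc]
        rfl
      rw [hstepA, hstepG]
      apply ih
      · rw [PySem.Dict.items_insert_of_not_contains _ _ hgc]
        simp only [List.map_append, List.map_cons, List.map_nil]
        refine List.Nodup.append hnd (List.nodup_singleton _) ?_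
        intro x hx hx'
        simp only [List.mem_singleton] at hx'
        subst hx'
        have : g.contains k = true := by
          rw [PySem.Dict.contains_iff_mem_keys]
          simpa [PySem.Dict.keys] using hx
        rw [this] at hgc; cases hgc
      · intro p hp
        rw [PySem.Dict.items_insert_of_not_contains _ _ hgc] at hp
        rcases List.mem_append.mp hp with h | h
        · exact hne p h
        · simp only [List.mem_singleton] at h; subst h; simp
      · rw [PySem.Dict.items_insert_of_not_contains _ _ hdc,
            PySem.Dict.items_insert_of_not_contains _ _ hgc, hrel]
        simp [pvPick]
    | some gr =>
      -- existing key
      have hgc : g.contains k = true := by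
        rw [PySem.Dict.contains_eq_isSome_get?, hg]; rfl
      have hgrne : gr ≠ [] := hne _ (PySem.Dict.mem_items_of_get?_eq_some _ hg)
      have hdget : d.get? k = some (pvPick gr) := by
        exact PySem.Dict.get?_of_mem_items _
          (by rw [hrel]; exact List.mem_map_of_mem (PySem.Dict.mem_items_of_get?_eq_some _ hg))
          (by simpa [PySem.Dict.keys] using hdnd)
      have hdc : d.contains k = true := by
        rw [PySem.Dict.contains_eq_isSome_get?, hdget]; rfl
      have hstepG : pvStepG g row = g.insert k (gr ++ [row]) := by
        unfold pvStepG
        show g.insert (pvKey row) (g.getD (pvKey row) [] ++ [row]) = _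
        rw [← hk, PySem.Dict.getD_of_get?_eq_some _ _ hg]
      -- value uniqueness at key k in g.items
      have huniq : ∀ p ∈ g.items, p.1 = k → p.2 = gr := by
        intro p hp hpk
        have : g.get? p.1 = some p.2 := PySem.Dict.get?_of_mem_items _ hp (by simpa [PySem.Dict.keys] using hnd)
        rw [hpk, hg] at this
        exact (Option.some.inj this).symm
      have hitemsG : (pvStepG g row).items
          = g.items.map (fun p => if p.1 == k then (k, gr ++ [row]) else p) := by
        rw [hstepG, PySem.Dict.items_insert_of_contains _ _ hgc]
      have hcond := pv_pick_concat gr hgrne row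
      have hstepA : pvStepA d raw
          = if (pvGetS row "source_date_updated" ≠ "" ∧
              (pvGetS (pvPick gr) "source_date_updated" = "" ∨
               pvGetS row "source_date_updated" < pvGetS (pvPick gr) "source_date_updated"))
            then d.insert k row else d := by
        unfold pvStepA
        simp only [← hrow, hkey, hdget]
      have hpickval : pvPick (gr ++ [row])
          = if (pvGetS row "source_date_updated" ≠ "" ∧
              (pvGetS (pvPick gr) "source_date_updated" = "" ∨
               pvGetS row "source_date_updated" < pvGetS (pvPick gr) "source_date_updated"))
            then row else pvPick gr := by
        rw [hcond]; unfold pvEarlier pvGetS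
        simp [PySem.Dict.getD_eq_get?_getD]
      rw [hstepA]
      have hnd' : ((pvStepG g row).items.map Prod.fst).Nodup := by
        rw [hitemsG]
        have : ∀ p ∈ g.items, ((fun p => if p.1 == k then (k, gr ++ [row]) else p) p).1 = p.1 := by
          intro p _
          by_cases hb : (p.1 == k) = true
          · simp [eq_of_beq hb]
          · simp [hb]
        rw [List.map_map]
        rw [List.map_congr_left (by intro p hp; exact this p hp)]
        exact hnd
      have hne' : ∀ p ∈ (pvStepG g row).items, p.2 ≠ [] := by
        rw [hitemsG]
        intro p hp
        simp only [List.mem_map] at hp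
        obtain ⟨q, hq, hqp⟩ := hp
        subst hqp
        split
        · simp
        · exact hne q hq
      split
      next hcondT =>
        apply ih _ _ hnd' hne'
        rw [PySem.Dict.items_insert_of_contains _ _ hdc, hitemsG, hrel, List.map_map, List.map_map]
        apply List.map_congr_left
        intro p hp
        simp only [Function.comp]
        by_cases hpk : p.1 = k
        · simp only [hpk, beq_self_eq_true, if_true]
          rw [hpickval, if_pos hcondT]
        · simp [hpk]
      next hcondF =>
        apply ih _ _ hnd' hne'
        rw [hitemsG, hrel, List.map_map]
        apply List.map_congr_left
        intro p hp
        simp only [Function.comp]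
        by_cases hpk : p.1 = k
        · simp only [hpk, beq_self_eq_true, if_true]
          rw [hpickval, if_neg hcondF, ← huniq p hp hpk]
        · simp [hpk]

-- ===== VERDICT (by name: the statement is the Claim_ definition above) =====
theorem sanitize_rows_spec : Claim_equal_sanitize_rows := by
  intro rows _
  unfold Spec_sanitize_rows sanitize_rows sanitize_rows_alt
  have hrel := pv_fold_invariant rows PySem.Dict.empty PySem.Dict.empty
    (by simp [PySem.Dict.empty]) (by simp [PySem.Dict.empty]) (by simp [PySem.Dict.empty])
  have htrim : rows.map pvTrim = rows.map pvTrimB := List.map_congr_left (fun r _ => pv_trim_eq r)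
  rw [htrim] at hrel
  have hvals : (rows.foldl pvStepA PySem.Dict.empty).values
      = ((rows.map pvTrimB).foldl pvStepG PySem.Dict.empty).values.map pvPick := by
    simp only [PySem.Dict.values, hrel, List.map_map]
    rfl
  simp only [hvals]
  rfl
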